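-- pv_equiv track=rewrite | github.com/Algorithm-study-busan/hosung | python/Prog_선입선출스케일링.py | solution
-- ===== SOURCE A (Python) =====
-- def cal_end_work(time, cores) :
--     ret = 0
--     for core in cores :
--         ret += time // core + 1
--     return ret
--
-- def solution(n, cores):
--     lo = 0
--     hi = 500_000_000
--
--     while lo <= hi :
--         mid = (lo + hi) // 2
--         if cal_end_work(mid, cores) >= n : hi = mid-1
--         else : lo = mid+1
--
--     if cal_end_work(lo, cores) < n : lo += 1
--
--     arr = []
--     for i, core in enumerate(cores) :
--         if lo % core == 0 : arr.append(i+1)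
--
--     return arr[-1 -(cal_end_work(lo, cores) - n)]
-- ===== SOURCE B (Python) =====
-- def solution(n, cores):
--     # FIFO simulation, fast-forwarded: by time t exactly sum(t//c + 1 for c) jobs
--     # have started, so jump straight to a time with fewer than n jobs started and
--     # event-simulate the handful of remaining assignments (earliest-free core takes
--     # the next job, lowest index on ties); the core taking the n-th job wins.
--     m = len(cores)
--     den = 1
--     for c in cores:
--         den *= c
--     num = sum(den // c for c in cores)
--     t = max((n - 1 - m) * den // num, -1)
--     times = [(t // c + 1) * c for c in cores]
--     done = sum(t // c for c in cores) + m
--     for _ in range(n - done):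
--         i = 0
--         for j in range(1, len(times)):
--             if times[j] < times[i]:
--                 i = j
--         times[i] += cores[i]
--     return i + 1
-- ===== Notes on version B (the rewrite author's own statement) =====
-- stated objective: alternative
-- what changed: Replaces A's binary search over completion times plus divisibility/back-indexing bookkeeping with an event-driven FIFO simulation that is fast-forwarded analytically: a rational estimate (n-1-m)*prod(cores)//sum(prod//c) jumps to a time with fewer than n jobs started, and the few remaining jobs are simulated by handing each to the earliest-free core (lowest index on ties).
-- outside the precondition, e.g. on solution(34, [-3, 1]): A returns 2, B returns 1; on solution(3, [250000001]): A returns 1, B returns 1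
import Mathlib
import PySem

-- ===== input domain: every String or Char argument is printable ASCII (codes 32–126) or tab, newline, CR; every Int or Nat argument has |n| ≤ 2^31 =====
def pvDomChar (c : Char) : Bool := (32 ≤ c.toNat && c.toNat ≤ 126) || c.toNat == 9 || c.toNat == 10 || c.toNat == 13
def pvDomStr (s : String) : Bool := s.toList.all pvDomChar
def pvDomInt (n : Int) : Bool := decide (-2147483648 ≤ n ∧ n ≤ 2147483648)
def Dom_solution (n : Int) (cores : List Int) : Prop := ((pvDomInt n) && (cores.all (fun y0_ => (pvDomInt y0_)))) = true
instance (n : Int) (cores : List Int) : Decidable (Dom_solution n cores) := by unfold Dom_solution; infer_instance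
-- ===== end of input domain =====

-- B replaces A's binary search over completion times (plus divisibility/back-indexing bookkeeping)
-- with an event-driven FIFO simulation fast-forwarded analytically: a rational estimate jumps to a
-- time with fewer than n jobs started, then the few remaining jobs are each handed to the
-- earliest-free core (lowest index on ties); the core taking the n-th job is the answer.

-- ===== PORT A =====
def cal_end_work (time : Int) (cores : List Int) : Int :=
  cores.foldl (fun ret core => ret + (PySem.Int.floordiv time core + 1)) 0

-- the 'while lo <= hi' binary-search loop of A, returning the final lo
def solutionLoop (n : Int) (cores : List Int) (lo hi : Int) : Int :=
  if h : lo ≤ hi then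
    let mid := PySem.Int.floordiv (lo + hi) 2
    if cal_end_work mid cores ≥ n then solutionLoop n cores lo (mid - 1)
    else solutionLoop n cores (mid + 1) hi
  else lo
termination_by (hi + 1 - lo).toNat
decreasing_by
  · have hb := PySem.Int.floordiv_two_mid_bounds h
    simp only [mid] at *; omega
  · have hb := PySem.Int.floordiv_two_mid_bounds h
    simp only [mid] at *; omega

def solution (n : Int) (cores : List Int) : Int :=
  let lo := solutionLoop n cores 0 500000000
  let lo := if cal_end_work lo cores < n then lo + 1 else lo
  let arr := (PySem.List.enumerate cores).foldl
    (fun arr ic => if PySem.Int.mod lo ic.2 == 0 then arr ++ [ic.1 + 1] else arr) ([] : List Int)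
  -- arr[-1 - (...)]; the IndexError cases are excluded by Pre_solution
  PySem.List.pyGetD arr (-1 - (cal_end_work lo cores - n)) 0

-- ===== PORT B =====
-- the inner 'for j in range(1, len(times)): if times[j] < times[i]: i = j' argmin scan (i starts at 0)
def argminB (ts : List Int) : Int :=
  (PySem.List.pyRange 1 (ts.length : Int) 1).foldl
    (fun i j => if PySem.List.pyGetD ts j 0 < PySem.List.pyGetD ts i 0 then j else i) 0

-- one iteration of B's job loop: pick the earliest-free core i, book it, remember i
def stepB (cores ts : List Int) : List Int × Int :=
  let i := argminB ts
  (PySem.List.pySetD ts i (PySem.List.pyGetD ts i 0 + PySem.List.pyGetD cores i 0), i)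

def solution_alt (n : Int) (cores : List Int) : Int :=
  -- Python's i is first assigned inside the loop (it runs ≥ 1 times under Pre_),
  -- so the pair carries it with dummy initial value 0
  let m : Int := cores.length
  let den := cores.foldl (fun d c => d * c) 1
  let num := cores.foldl (fun s c => s + PySem.Int.floordiv den c) 0
  let t := max (PySem.Int.floordiv ((n - 1 - m) * den) num) (-1)
  let times := cores.map (fun c => (PySem.Int.floordiv t c + 1) * c)
  let done := cores.foldl (fun s c => s + PySem.Int.floordiv t c) 0 + m
  ((PySem.List.pyRange 0 (n - done) 1).foldl (fun st _ => stepB cores st.1)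
    (times, (0 : Int))).2 + 1

-- ===== PRECONDITION & SPEC =====
-- Pre_ excludes non-positive core times (outside the task's domain: Python '//' on them makes A's
-- job count non-monotone, so the index A returns is accidental) and n outside [1, number of jobs
-- startable by time 500000001, A's hard-coded search cap + 1], where A raises IndexError on all
-- but razor-thin boundary cases.
def Pre_solution (n : Int) (cores : List Int) : Prop :=
  cores ≠ [] ∧ (∀ c ∈ cores, 1 ≤ c) ∧ 1 ≤ n ∧
    n ≤ (cores.map (fun c => 500000001 / c)).sum + cores.length
instance (n : Int) (cores : List Int) : Decidable (Pre_solution n cores) := by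
  unfold Pre_solution; infer_instance
def pvWitness_solution : Int × List Int := (4, [2, 3])
def Spec_solution (n : Int) (cores : List Int) (out : Int) : Prop := out = solution_alt n cores
instance (n : Int) (cores : List Int) (out : Int) : Decidable (Spec_solution n cores out) := by unfold Spec_solution; infer_instance

-- ===== CLAIM (what is proved, stated in full; the proofs are below) =====
def Claim_equal_solution : Prop := ∀ (n : Int) (cores : List Int), Dom_solution n cores → Pre_solution n cores → Spec_solution n cores (solution n cores)

-- ===== LEMMAS AND PROOFS =====

-- ---------- shared arithmetic ----------

-- t // c steps by exactly 1 from t-1 to t iff c divides t (positive c)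
lemma div_step (t c : Int) (hc : 1 ≤ c) :
    t / c = (t-1) / c + (if c ∣ t then 1 else 0) := by
  by_cases hd : c ∣ t
  · obtain ⟨q, rfl⟩ := hd
    have h1 : (c * q) / c = q := Int.mul_ediv_cancel_left q (by omega)
    have h2 : (c * q - 1) / c = q - 1 := by
      have : c * q - 1 = (c - 1) + (q - 1) * c := by ring
      rw [this, Int.add_mul_ediv_right _ _ (by omega : c ≠ 0),
        Int.ediv_eq_zero_of_lt (by omega) (by omega)]
      omega
    simp [h1, h2, Dvd.intro q rfl]
  · have hr0 : 0 ≤ t % c := Int.emod_nonneg t (by omega)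
    have hrc : t % c < c := Int.emod_lt_of_pos t (by omega)
    have hr1 : 1 ≤ t % c := by
      rcases lt_or_eq_of_le hr0 with h | h
      · omega
      · exfalso; exact hd (Int.dvd_of_emod_eq_zero h.symm)
    have heq : c * (t / c) + t % c = t := Int.mul_ediv_add_emod t c
    have hcm : c * (t / c) = (t / c) * c := mul_comm _ _
    have h2 : (t - 1) / c = t / c := by
      have : t - 1 = (t % c - 1) + (t / c) * c := by omega
      rw [this, Int.add_mul_ediv_right _ _ (by omega : c ≠ 0),
        Int.ediv_eq_zero_of_lt (by omega) (by omega)]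
      omega
    simp [hd, h2]

-- sum(t // c for c in cores) as a mapped sum over '/' (valid for positive cores)
def S (t : Int) (cores : List Int) : Int := (cores.map (fun c => t / c)).sum

lemma cal_end_work_eq (t : Int) (cores : List Int) (hpos : ∀ c ∈ cores, 1 ≤ c) :
    cal_end_work t cores = S t cores + cores.length := by
  unfold cal_end_work
  rw [PySem.List.foldl_add (g := fun core => PySem.Int.floordiv t core + 1)]
  rw [List.map_congr_left (fun c hc => by
    rw [PySem.Int.floordiv_eq_ediv_of_pos (by have := hpos c hc; omega)] :
    ∀ c ∈ cores, PySem.Int.floordiv t c + 1 = t / c + 1)]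
  simp [S]

lemma S_mono (cores : List Int) (hpos : ∀ c ∈ cores, 1 ≤ c) {t t' : Int} (h : t ≤ t') :
    S t cores ≤ S t' cores := by
  unfold S
  exact List.sum_le_sum (fun c hc => Int.ediv_le_ediv (by have := hpos c hc; omega) h)

lemma S_neg_one (cores : List Int) (hpos : ∀ c ∈ cores, 1 ≤ c) :
    S (-1) cores = -(cores.length : Int) := by
  unfold S
  rw [List.map_congr_left (fun c hc => by
    have hc1 := hpos c hc
    have h : (-1 : Int) = (c - 1) + (-1) * c := by ring
    conv_lhs => rw [h]
    rw [Int.add_mul_ediv_right _ _ (by omega : c ≠ 0),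
      Int.ediv_eq_zero_of_lt (by omega) (by omega)]
    norm_num :
    ∀ c ∈ cores, (-1) / c = -1)]
  simp

-- S as a sum over positions
lemma S_range (t : Int) (cores : List Int) :
    S t cores = ∑ j ∈ Finset.range cores.length, t / cores.getD j 0 := by
  induction cores with
  | nil => simp [S]
  | cons c cs ih =>
    simp only [S, List.map_cons, List.sum_cons, List.length_cons] at *
    rw [Finset.sum_range_succ', ih]
    simp [add_comm]

-- the list of core numbers (1-based) starting a job at time T, as A builds it from index i on
def arrFrom (T : Int) (cores : List Int) (i : Int) : List Int :=
  ((PySem.List.enumerate cores i).filter (fun ic => PySem.Int.mod T ic.2 == 0)).map (fun ic => ic.1 + 1)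

lemma arrFrom_nil (T i : Int) : arrFrom T [] i = [] := rfl

lemma arrFrom_cons (T c : Int) (rest : List Int) (i : Int) :
    arrFrom T (c :: rest) i =
      (if PySem.Int.mod T c == 0 then [i + 1] else []) ++ arrFrom T rest (i + 1) := by
  unfold arrFrom
  rw [PySem.List.enumerate_cons]
  by_cases h : PySem.Int.mod T c == 0 <;> simp [h]

lemma cal_mono (cores : List Int) (hpos : ∀ c ∈ cores, 1 ≤ c) {t t' : Int} (h : t ≤ t') :
    cal_end_work t cores ≤ cal_end_work t' cores := by
  rw [cal_end_work_eq _ _ hpos, cal_end_work_eq _ _ hpos]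
  have := S_mono cores hpos h
  omega

-- invariant of A's while loop: it returns the least time reaching n started jobs
lemma solutionLoop_spec (n : Int) (cores : List Int) (hpos : ∀ c ∈ cores, 1 ≤ c) :
    ∀ (fuel : Nat) (lo hi : Int), (hi + 1 - lo).toNat = fuel →
      lo ≤ hi + 1 →
      cal_end_work (lo - 1) cores < n → n ≤ cal_end_work (hi + 1) cores →
      cal_end_work (solutionLoop n cores lo hi - 1) cores < n ∧
        n ≤ cal_end_work (solutionLoop n cores lo hi) cores := by
  intro fuel
  induction fuel using Nat.strong_induction_on with
  | _ fuel ih =>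
    intro lo hi hfuel hle hlo hhi
    rw [solutionLoop]
    by_cases h : lo ≤ hi
    · rw [dif_pos h]
      have hb := PySem.Int.floordiv_two_mid_bounds h
      set mid := PySem.Int.floordiv (lo + hi) 2 with hmid
      by_cases hge : cal_end_work mid cores ≥ n
      · rw [if_pos hge]
        exact ih (mid - 1 + 1 - lo).toNat (by omega) lo (mid - 1) rfl (by omega) hlo
          (by simpa using hge)
      · rw [if_neg hge]
        exact ih (hi + 1 - (mid + 1)).toNat (by omega) (mid + 1) hi rfl (by omega)
          (by simpa using not_le.mp hge) hhi
    · rw [dif_neg h]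
      have : lo = hi + 1 := by omega
      exact ⟨by simpa [this] using hlo, by simpa [this] using hhi⟩

lemma min_unique (cores : List Int) (hpos : ∀ c ∈ cores, 1 ≤ c) (n x y : Int)
    (hx1 : cal_end_work (x - 1) cores < n) (hx2 : n ≤ cal_end_work x cores)
    (hy1 : cal_end_work (y - 1) cores < n) (hy2 : n ≤ cal_end_work y cores) : x = y := by
  by_contra hne
  rcases lt_or_gt_of_ne hne with h | h
  · have := cal_mono cores hpos (show x ≤ y - 1 by omega)
    omega
  · have := cal_mono cores hpos (show y ≤ x - 1 by omega)
    omega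

lemma pyGetD_neg_eq_getD (xs : List Int) (idx : Int)
    (hlo : -(xs.length : Int) ≤ idx) (hhi : idx < 0) :
    PySem.List.pyGetD xs idx 0 = xs.getD ((xs.length : Int) + idx).toNat 0 := by
  have hk : idx = -(((-idx).toNat : Nat) : Int) := by omega
  rw [hk, PySem.List.pyGetD_neg_natCast _ _ _ (by omega) (by omega)]
  rw [List.getD_eq_getElem _ _ (by omega)]
  congr 1
  omega

-- ---------- the job-rank machinery for B's simulation ----------

-- number of jobs started by time t (cal_end_work in S form)
def cntI (cores : List Int) (t : Int) : Int := S t cores + cores.length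

-- number of cores with index ≤ i whose cycle divides t (1-based position of core i among
-- the cores starting a job at time t, when cv i ∣ t)
def posD (cores : List Int) (t : Int) : Nat → Int
  | 0 => if cores.getD 0 0 ∣ t then 1 else 0
  | i+1 => posD cores t i + (if cores.getD (i+1) 0 ∣ t then 1 else 0)

-- global FIFO rank of job (t, i): jobs started before t, plus same-time jobs on cores ≤ i
def rnk (cores : List Int) (t : Int) (i : Nat) : Int := cntI cores (t-1) + posD cores t i

lemma posD_eq_sum (cores : List Int) (t : Int) (i : Nat) :
    posD cores t i = ∑ j ∈ Finset.range (i+1), (if cores.getD j 0 ∣ t then (1:Int) else 0) := by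
  induction i with
  | zero => rw [Finset.sum_range_one]; rfl
  | succ i ih => rw [posD, ih, ← Finset.sum_range_succ]

lemma posD_mono (cores : List Int) (t : Int) {i i' : Nat} (h : i ≤ i') :
    posD cores t i ≤ posD cores t i' := by
  induction i' with
  | zero => simp_all
  | succ i' ih =>
    rcases Nat.eq_or_lt_of_le h with rfl | h'
    · exact le_refl _
    · have := ih (by omega)
      rw [posD]
      split <;> omega

lemma posD_pos (cores : List Int) (t : Int) (i : Nat) (hd : cores.getD i 0 ∣ t) :
    1 ≤ posD cores t i := by
  cases i with
  | zero => rw [show posD cores t 0 = 1 by unfold posD; rw [if_pos hd]]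
  | succ i =>
    have h0 : (0:Int) ≤ posD cores t i := by
      have := posD_eq_sum cores t i
      rw [this]
      exact Finset.sum_nonneg (fun j _ => by split <;> omega)
    rw [posD, if_pos hd]
    omega

lemma posD_lt (cores : List Int) (t : Int) {j i : Nat} (h : j < i)
    (hd : cores.getD i 0 ∣ t) : posD cores t j < posD cores t i := by
  cases i with
  | zero => omega
  | succ i =>
    have := posD_mono cores t (show j ≤ i by omega)
    rw [posD, if_pos hd]
    omega

-- one time step of the counting function equals the number of divisor cores
lemma getD_mem_of_lt (cores : List Int) (j : Nat) (hj : j < cores.length) :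
    cores.getD j 0 ∈ cores := by
  rw [List.getD_eq_getElem _ _ hj]
  exact List.getElem_mem _

lemma cnt_step (cores : List Int) (hpos : ∀ c ∈ cores, 1 ≤ c) (hne : cores ≠ []) (t : Int) :
    cntI cores t = cntI cores (t-1) + posD cores t (cores.length - 1) := by
  have hm : 1 ≤ cores.length := List.length_pos_iff.mpr hne
  have hkey : ∀ j ∈ Finset.range cores.length,
      t / cores.getD j 0 = (t-1) / cores.getD j 0 + (if cores.getD j 0 ∣ t then (1:Int) else 0) := by
    intro j hj
    exact div_step t _ (hpos _ (getD_mem_of_lt cores j (Finset.mem_range.mp hj)))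
  unfold cntI
  rw [S_range, S_range, posD_eq_sum]
  rw [Finset.sum_congr rfl hkey, Finset.sum_add_distrib]
  have hmm : cores.length - 1 + 1 = cores.length := by omega
  rw [hmm]
  ring

-- strict lexicographic monotonicity of the rank
lemma rnk_lt (cores : List Int) (hpos : ∀ c ∈ cores, 1 ≤ c) {s t : Int} {j i : Nat}
    (hj : j < cores.length) (hi : i < cores.length) (hdt : cores.getD i 0 ∣ t)
    (h : s < t ∨ (s = t ∧ j < i)) : rnk cores s j < rnk cores t i := by
  have hne : cores ≠ [] := by intro hcon; subst hcon; simp at hi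
  have hpd : 1 ≤ posD cores t i := posD_pos _ _ _ hdt
  rcases h with hlt | ⟨rfl, hji⟩
  · unfold rnk
    have h1 : posD cores s j ≤ posD cores s (cores.length - 1) :=
      posD_mono cores s (by omega)
    have h2 := cnt_step cores hpos hne s
    have h3 : cntI cores s ≤ cntI cores (t-1) := by
      unfold cntI
      have := S_mono cores hpos (show s ≤ t-1 by omega)
      omega
    omega
  · unfold rnk
    have := posD_lt cores s hji hdt
    omega

-- the p-th entry of A's arr list is the core at divisor-position p+1
lemma mod_beq_dvd (t c : Int) : (PySem.Int.mod t c == 0) = true ↔ c ∣ t := by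
  rw [beq_iff_eq]
  exact PySem.Int.mod_eq_zero_iff_dvd t c

lemma posD_cons (c : Int) (cs : List Int) (t : Int) (i : Nat) :
    posD (c :: cs) t (i+1) = (if c ∣ t then 1 else 0) + posD cs t i := by
  induction i with
  | zero => simp [posD]
  | succ i ih =>
    rw [show posD (c :: cs) t (i+1+1)
        = posD (c :: cs) t (i+1) + (if (c :: cs).getD (i+1+1) 0 ∣ t then 1 else 0) from rfl]
    rw [ih, List.getD_cons_succ]
    rw [show posD cs t (i+1) = posD cs t i + (if cs.getD (i+1) 0 ∣ t then 1 else 0) from rfl]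
    ring

lemma arrFrom_getD (t : Int) :
    ∀ (cores : List Int) (o : Int) (i : Nat), i < cores.length → cores.getD i 0 ∣ t →
      (arrFrom t cores o).getD (posD cores t i - 1).toNat 0 = o + (i : Int) + 1 := by
  intro cores
  induction cores with
  | nil => intro o i hi; simp at hi
  | cons c cs ih =>
    intro o i hi hd
    cases i with
    | zero =>
      rw [List.getD_cons_zero] at hd
      rw [show posD (c :: cs) t 0 = 1 by unfold posD; rw [List.getD_cons_zero, if_pos hd]]
      rw [arrFrom_cons, if_pos (by rw [mod_beq_dvd]; exact hd)]
      simp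
    | succ i =>
      rw [List.getD_cons_succ] at hd
      have hi' : i < cs.length := by simpa using hi
      rw [posD_cons]
      have hP : 1 ≤ posD cs t i := posD_pos _ _ _ hd
      by_cases hc : c ∣ t
      · rw [if_pos hc, arrFrom_cons, if_pos (by rw [mod_beq_dvd]; exact hc)]
        have htn : (1 + posD cs t i - 1).toNat = (posD cs t i - 1).toNat + 1 := by omega
        rw [htn]
        simp only [List.singleton_append, List.getD_cons_succ]
        rw [ih (o+1) i hi' hd]
        push_cast
        ring
      · rw [if_neg hc, arrFrom_cons, if_neg (by rw [mod_beq_dvd]; exact hc)]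
        simp only [List.nil_append, zero_add]
        rw [ih (o+1) i hi' hd]
        push_cast
        ring

-- length of A's arr list = divisor count at t
lemma arrFrom_length (t : Int) (cores : List Int) (hpos : ∀ c ∈ cores, 1 ≤ c)
    (hne : cores ≠ []) (o : Int) :
    ((arrFrom t cores o).length : Int) = posD cores t (cores.length - 1) := by
  have hm : 1 ≤ cores.length := List.length_pos_iff.mpr hne
  have haux : ∀ (cs : List Int) (o : Int), ((arrFrom t cs o).length : Int)
      = ∑ j ∈ Finset.range cs.length, (if cs.getD j 0 ∣ t then (1:Int) else 0) := by
    intro cs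
    induction cs with
    | nil => intro o; simp [arrFrom_nil]
    | cons c cs ih =>
      intro o
      rw [arrFrom_cons]
      rw [List.length_append]
      simp only [List.length_cons]
      rw [Finset.sum_range_succ']
      simp only [List.getD_cons_succ, List.getD_cons_zero]
      rw [← ih (o+1)]
      by_cases hc : c ∣ t
      · rw [if_pos (by rw [mod_beq_dvd]; exact hc), if_pos hc]
        simp [add_comm]
      · rw [if_neg (by rw [mod_beq_dvd]; exact hc), if_neg hc]
        simp [add_comm]
  rw [haux cores o, posD_eq_sum]
  have hmm : cores.length - 1 + 1 = cores.length := by omega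
  rw [hmm]

-- ---------- B's argmin scan ----------

-- the argmin fold restricted to the first q indices (argminB ts = argminFold ts ts.length)
def argminFold (ts : List Int) (q : Nat) : Int :=
  (PySem.List.pyRange 1 (q : Int) 1).foldl
    (fun i j => if PySem.List.pyGetD ts j 0 < PySem.List.pyGetD ts i 0 then j else i) 0

lemma argmin_aux (ts : List Int) : ∀ q : Nat, 1 ≤ q → q ≤ ts.length →
    0 ≤ argminFold ts q ∧ (argminFold ts q).toNat < q ∧
      (∀ j : Nat, j < q → ts.getD (argminFold ts q).toNat 0 ≤ ts.getD j 0) ∧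
      (∀ j : Nat, (j : Int) < argminFold ts q → ts.getD (argminFold ts q).toNat 0 < ts.getD j 0) := by
  intro q
  induction q with
  | zero => omega
  | succ q ih =>
    intro _ hle
    by_cases hq : 1 ≤ q
    · obtain ⟨h0, hlt, hmin, hstr⟩ := ih hq (by omega)
      have hsplit : argminFold ts (q+1)
          = if PySem.List.pyGetD ts (q:Int) 0 < PySem.List.pyGetD ts (argminFold ts q) 0
            then (q:Int) else argminFold ts q := by
        unfold argminFold
        rw [show ((q+1:Nat):Int) = (q:Int) + 1 by push_cast; ring]
        rw [PySem.List.pyRange_one_succ_right (by exact_mod_cast hq)]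
        rw [List.foldl_append]
        rfl
      have hgq : PySem.List.pyGetD ts (q:Int) 0 = ts.getD q 0 := by
        simp
      have hgr : PySem.List.pyGetD ts (argminFold ts q) 0 = ts.getD (argminFold ts q).toNat 0 := by
        obtain ⟨k, hk⟩ : ∃ k : Nat, argminFold ts q = (k:Int) :=
          ⟨_, (Int.toNat_of_nonneg h0).symm⟩
        rw [hk]
        simp
      rw [hsplit, hgq, hgr]
      by_cases hcmp : ts.getD q 0 < ts.getD (argminFold ts q).toNat 0
      · rw [if_pos hcmp]
        refine ⟨by omega, by simp, ?_, ?_⟩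
        · intro j hj
          simp only [Int.toNat_natCast]
          rcases Nat.lt_or_ge j q with h' | h'
          · exact le_of_lt (lt_of_lt_of_le hcmp (hmin j h'))
          · have : j = q := by omega
            subst this; exact le_refl _
        · intro j hj
          have hj' : j < q := by exact_mod_cast hj
          simp only [Int.toNat_natCast]
          exact lt_of_lt_of_le hcmp (hmin j hj')
      · rw [if_neg hcmp]
        refine ⟨h0, by omega, ?_, hstr⟩
        intro j hj
        rcases Nat.lt_or_ge j q with h' | h'
        · exact hmin j h'
        · have : j = q := by omega
          subst this; omega
    · have hq0 : q = 0 := by omega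
      subst hq0
      have : argminFold ts 1 = 0 := by
        unfold argminFold
        rw [show ((1:Nat):Int) = (1:Int) by norm_num, PySem.List.pyRange_one_eq_nil (le_refl 1)]
        rfl
      rw [this]
      refine ⟨le_refl _, by omega, ?_, ?_⟩
      · intro j hj
        have : j = 0 := by omega
        subst this; exact le_refl _
      · intro j hj
        omega

lemma argminB_spec (ts : List Int) (hne : ts ≠ []) :
    0 ≤ argminB ts ∧ (argminB ts).toNat < ts.length ∧
      (∀ j : Nat, j < ts.length → ts.getD (argminB ts).toNat 0 ≤ ts.getD j 0) ∧
      (∀ j : Nat, (j : Int) < argminB ts → ts.getD (argminB ts).toNat 0 < ts.getD j 0) := by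
  have hm : 1 ≤ ts.length := List.length_pos_iff.mpr hne
  have heq : argminB ts = argminFold ts ts.length := rfl
  rw [heq]
  exact argmin_aux ts ts.length hm (le_refl _)

-- ---------- the simulation invariant ----------

def SimInv (cores : List Int) (k : Nat) (ts : List Int) : Prop :=
  ts.length = cores.length ∧
  (∀ j, j < cores.length → 0 ≤ ts.getD j 0 ∧ cores.getD j 0 ∣ ts.getD j 0 ∧
     (k : Int) < rnk cores (ts.getD j 0) j ∧
     (∀ s : Int, 0 ≤ s → cores.getD j 0 ∣ s → s < ts.getD j 0 → rnk cores s j ≤ (k : Int))) ∧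
  (∑ j ∈ Finset.range cores.length, ts.getD j 0 / cores.getD j 0) = (k : Int)

-- getD after set
lemma getD_set_eq (xs : List Int) (a : Nat) (v : Int) (ha : a < xs.length) (j : Nat) :
    (xs.set a v).getD j 0 = if j = a then v else xs.getD j 0 := by
  by_cases hj : j < xs.length
  · rw [List.getD_eq_getElem _ _ (by simpa using hj), List.getElem_set]
    by_cases h : j = a
    · subst h; simp
    · rw [if_neg (fun hcon : a = j => h hcon.symm), if_neg h, List.getD_eq_getElem _ _ hj]
  · rw [List.getD_eq_default _ _ (by simpa using hj),
      List.getD_eq_default _ _ (by omega)]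
    rw [if_neg (by omega)]

lemma sum_delta (cores : List Int) (t : Int) (i : Nat) :
    ∀ M : Nat, i < M →
      ∑ j ∈ Finset.range M, (if cores.getD j 0 ∣ t ∧ j < i then (1:Int) else 0)
        = ∑ j ∈ Finset.range i, (if cores.getD j 0 ∣ t then (1:Int) else 0) := by
  intro M
  induction M with
  | zero => omega
  | succ M ih =>
    intro hiM
    rw [Finset.sum_range_succ]
    rcases Nat.lt_or_ge i M with hM | hM
    · rw [ih hM, if_neg (by rintro ⟨-, h2⟩; omega)]
      ring
    · have hieq : i = M := by omega
      subst hieq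
      rw [if_neg (by rintro ⟨-, h2⟩; omega), add_zero]
      exact Finset.sum_congr rfl (fun j hj => by
        have hj' : j < i := Finset.mem_range.mp hj
        by_cases hd : cores.getD j 0 ∣ t <;> simp [hj'])

lemma step_inv (cores ts : List Int) (k : Nat) (hpos : ∀ c ∈ cores, 1 ≤ c)
    (hne : cores ≠ []) (hInv : SimInv cores k ts) :
    SimInv cores (k+1) (stepB cores ts).1 ∧
      ∃ i : Nat, i < cores.length ∧ (stepB cores ts).2 = (i : Int) ∧
        (stepB cores ts).1.getD i 0 = ts.getD i 0 + cores.getD i 0 ∧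
        rnk cores (ts.getD i 0) i = (k : Int) + 1 := by
  obtain ⟨hlen, hjs, hsum⟩ := hInv
  have hm : 1 ≤ cores.length := List.length_pos_iff.mpr hne
  have htsne : ts ≠ [] := by
    intro hcon
    rw [hcon] at hlen
    simp at hlen
    omega
  obtain ⟨hr0, hrlt, hminle, hstrict⟩ := argminB_spec ts htsne
  set i := (argminB ts).toNat with hidef
  have hrI : argminB ts = (i : Int) := (Int.toNat_of_nonneg hr0).symm
  have him : i < cores.length := by omega
  obtain ⟨ht0, hdi, hrk, hbelow⟩ := hjs i him
  set t := ts.getD i 0 with htdef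
  have hcv : ∀ j, j < cores.length → 1 ≤ cores.getD j 0 := fun j hj =>
    hpos _ (getD_mem_of_lt cores j hj)
  have hstep1 : (stepB cores ts).1 = ts.set i (t + cores.getD i 0) := by
    show PySem.List.pySetD ts (argminB ts)
        (PySem.List.pyGetD ts (argminB ts) 0 + PySem.List.pyGetD cores (argminB ts) 0) = _
    rw [hrI, PySem.List.pySetD_natCast, PySem.List.pyGetD_natCast, PySem.List.pyGetD_natCast]
  have hstep2 : (stepB cores ts).2 = (i : Int) := hrI
  have hminle' : ∀ j, j < cores.length → t ≤ ts.getD j 0 := fun j hj => hminle j (by omega)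
  have hstrict' : ∀ j : Nat, j < i → t < ts.getD j 0 := fun j hj =>
    hstrict j (by rw [hrI]; exact_mod_cast hj)
  -- per-core booked-job count after k pops, as a function of the popped time t
  have hform : ∀ j, j < cores.length →
      ts.getD j 0 / cores.getD j 0
        = (t-1) / cores.getD j 0 + 1 + (if cores.getD j 0 ∣ t ∧ j < i then 1 else 0) := by
    intro j hj
    obtain ⟨h0j, hdj, hrkj, hbelj⟩ := hjs j hj
    have hcvj := hcv j hj
    by_cases hji : j = i
    · subst hji
      rw [if_neg (by rintro ⟨-, h2⟩; omega), div_step t _ hcvj, if_pos hdi]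
      ring
    · rcases eq_or_lt_of_le (hminle' j hj) with heq | hlt
      · -- this core also frees exactly at t; it must sit at a larger index
        have hij : i < j := by
          rcases Nat.lt_or_ge j i with hlt' | hge
          · exact absurd heq (by have := hstrict' j hlt'; omega)
          · omega
        have hdjt : cores.getD j 0 ∣ t := by rw [heq]; exact hdj
        rw [← heq, div_step t _ hcvj, if_pos hdjt, if_neg (by rintro ⟨-, h2⟩; omega)]
        ring
      · -- this core frees strictly later than t
        have hjg1 : cores.getD j 0 ≤ ts.getD j 0 := Int.le_of_dvd (by omega) hdj
        set p := ts.getD j 0 - cores.getD j 0 with hpdef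
        have hdp : cores.getD j 0 ∣ p := Dvd.dvd.sub hdj dvd_rfl
        have hp0 : 0 ≤ p := by omega
        have hplt : p < ts.getD j 0 := by omega
        have hrkp : rnk cores p j ≤ (k:Int) := hbelj p hp0 hdp hplt
        have hpnotgt : ¬ t < p := by
          intro hgt
          have := rnk_lt cores hpos him hj hdp (Or.inl hgt)
          omega
        have hpediv : p / cores.getD j 0 = ts.getD j 0 / cores.getD j 0 - 1 := by
          have hx : p = ts.getD j 0 + (-1) * cores.getD j 0 := by omega
          rw [hx, Int.add_mul_ediv_right _ _ (by omega)]
          ring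
        by_cases hdvd : cores.getD j 0 ∣ t
        · -- divisor core beyond? its previous job must have started exactly at t
          have hpt : p = t := by
            rcases lt_trichotomy p t with hlt' | he | hgt'
            · exfalso
              have hdd : cores.getD j 0 ∣ (t - p) := Dvd.dvd.sub hdvd hdp
              have := Int.le_of_dvd (by omega) hdd
              omega
            · exact he
            · exact absurd hgt' hpnotgt
          have hij : j < i := by
            rcases Nat.lt_or_ge j i with h' | h'
            · exact h'
            · exfalso
              have hij' : i < j := by omega
              have := rnk_lt cores hpos him hj hdvd (Or.inr ⟨rfl, hij'⟩)
              rw [hpt] at hrkp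
              omega
          rw [if_pos ⟨hdvd, hij⟩]
          have h1 : ts.getD j 0 = t + 1 * cores.getD j 0 := by omega
          rw [h1, Int.add_mul_ediv_right _ _ (by omega), div_step t _ hcvj, if_pos hdvd]
        · -- non-divisor: previous job started strictly before t
          have hplt' : p < t := by
            rcases lt_trichotomy p t with h' | he | h'
            · exact h'
            · exact absurd (he ▸ hdp) hdvd
            · exact absurd h' hpnotgt
          have hup : ts.getD j 0 / cores.getD j 0 - 1 ≤ (t-1) / cores.getD j 0 := by
            have := Int.ediv_le_ediv (by omega : (0:Int) < cores.getD j 0)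
              (show p ≤ t - 1 by omega)
            omega
          have hdown : t / cores.getD j 0 < ts.getD j 0 / cores.getD j 0 := by
            rw [Int.ediv_lt_iff_lt_mul (by omega : (0:Int) < cores.getD j 0)]
            rw [Int.ediv_mul_cancel hdj]
            exact hlt
          rw [if_neg (by rintro ⟨hd', -⟩; exact hdvd hd')]
          rw [div_step t _ hcvj, if_neg hdvd] at hdown
          omega
  -- the popped job's global rank is k+1
  have hpdi : posD cores t i
      = (∑ j ∈ Finset.range i, (if cores.getD j 0 ∣ t then (1:Int) else 0)) + 1 := by
    rw [posD_eq_sum, Finset.sum_range_succ, if_pos hdi]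
  have hsum2 : (k:Int) = S (t-1) cores + cores.length + posD cores t i - 1 := by
    rw [← hsum, Finset.sum_congr rfl (fun j hj => hform j (Finset.mem_range.mp hj))]
    rw [Finset.sum_add_distrib, Finset.sum_add_distrib]
    rw [← S_range, sum_delta cores t i _ him]
    rw [Finset.sum_const, Finset.card_range]
    rw [hpdi]
    ring
  have hrti : rnk cores t i = (k:Int) + 1 := by
    unfold rnk cntI
    omega
  have hset : ∀ j : Nat, (ts.set i (t + cores.getD i 0)).getD j 0
      = if j = i then t + cores.getD i 0 else ts.getD j 0 :=
    getD_set_eq ts i _ (by omega)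
  refine ⟨⟨?_, ?_, ?_⟩, i, him, hstep2, ?_, hrti⟩
  · rw [hstep1]
    simp [hlen]
  · -- per-core invariant at k+1
    intro j hj
    rw [hstep1, hset j]
    by_cases hji : j = i
    · subst hji
      rw [if_pos rfl]
      have hcvi := hcv i hj
      refine ⟨by omega, dvd_add hdi dvd_rfl, ?_, ?_⟩
      · have := rnk_lt cores hpos hj hj (dvd_add hdi dvd_rfl)
          (Or.inl (show t < t + cores.getD i 0 by omega))
        omega
      · intro s hs0 hds hslt
        rcases lt_trichotomy s t with h' | he | h'
        · have := hbelow s hs0 hds h'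
          omega
        · rw [he]
          omega
        · exfalso
          have hdd : cores.getD i 0 ∣ (s - t) := Dvd.dvd.sub hds hdi
          have := Int.le_of_dvd (by omega) hdd
          omega
    · rw [if_neg hji]
      obtain ⟨h0j, hdj, hrkj, hbelj⟩ := hjs j hj
      refine ⟨h0j, hdj, ?_, fun s hs0 hds hslt => le_trans (hbelj s hs0 hds hslt) (by omega)⟩
      rcases eq_or_lt_of_le (hminle' j hj) with heq | hlt
      · have hij : i < j := by
          rcases Nat.lt_or_ge j i with hlt' | hge
          · exact absurd heq (by have := hstrict' j hlt'; omega)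
          · omega
        have hdjt : cores.getD j 0 ∣ t := by rw [heq]; exact hdj
        have := rnk_lt cores hpos him hj hdjt (Or.inr ⟨rfl, hij⟩)
        rw [← heq]
        omega
      · have := rnk_lt cores hpos him hj hdj (Or.inl hlt)
        omega
  · -- the booked-time sum advances by one job
    rw [hstep1]
    rw [Finset.sum_congr rfl (fun j hj => by rw [hset j])]
    have hterm : ∀ j ∈ Finset.range cores.length,
        (if j = i then t + cores.getD i 0 else ts.getD j 0) / cores.getD j 0
          = ts.getD j 0 / cores.getD j 0 + (if j = i then 1 else 0) := by
      intro j hj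
      by_cases h : j = i
      · subst h
        rw [if_pos rfl, if_pos rfl]
        have hx : t + cores.getD i 0 = t + 1 * cores.getD i 0 := by ring
        rw [hx, Int.add_mul_ediv_right _ _ (by have := hcv i (Finset.mem_range.mp hj); omega)]
      · rw [if_neg h, if_neg h, add_zero]
    rw [Finset.sum_congr rfl hterm, Finset.sum_add_distrib, hsum]
    rw [Finset.sum_ite_eq' (Finset.range cores.length) i (fun _ => (1:Int))]
    rw [if_pos (Finset.mem_range.mpr him)]
    push_cast
    ring
  · rw [hstep1, hset i, if_pos rfl]

-- iterated simulation

lemma foldl_const {α β : Type} (g : α → α) :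
    ∀ (l : List β) (s : α), l.foldl (fun s _ => g s) s = g^[l.length] s := by
  intro l
  induction l with
  | nil => intro s; rfl
  | cons x xs ih =>
    intro s
    simp [List.foldl_cons, ih, Function.iterate_succ_apply]

lemma ediv_mul_le_self (a b : Int) (hb : 0 < b) : a / b * b ≤ a := by
  have h1 := Int.emod_nonneg a (show b ≠ 0 by omega)
  have h2 := Int.mul_ediv_add_emod a b
  have h3 : b * (a / b) = (a / b) * b := mul_comm _ _
  omega

-- the fast-forwarded start state satisfies the simulation invariant
lemma simInv_seed (cores : List Int) (hpos : ∀ c ∈ cores, 1 ≤ c) (hne : cores ≠ [])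
    (t1 : Int) (ht1 : -1 ≤ t1) :
    SimInv cores (cntI cores t1).toNat (cores.map (fun c => (t1 / c + 1) * c)) := by
  have hm : 1 ≤ cores.length := List.length_pos_iff.mpr hne
  have hSneg := S_neg_one cores hpos
  have hcnt0 : 0 ≤ cntI cores t1 := by
    unfold cntI
    have := S_mono cores hpos ht1
    omega
  have hK : (((cntI cores t1).toNat : Nat) : Int) = cntI cores t1 := Int.toNat_of_nonneg hcnt0
  have hget : ∀ j, j < cores.length → (cores.map (fun c => (t1 / c + 1) * c)).getD j 0
      = (t1 / cores.getD j 0 + 1) * cores.getD j 0 := by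
    intro j hj
    rw [List.getD_eq_getElem _ _ (by simpa using hj), List.getElem_map,
      List.getD_eq_getElem _ _ hj]
  refine ⟨by simp, ?_, ?_⟩
  · intro j hj
    rw [hget j hj]
    have hcvj : 1 ≤ cores.getD j 0 := hpos _ (getD_mem_of_lt cores j hj)
    have hmod1 := Int.emod_nonneg t1 (show cores.getD j 0 ≠ 0 by omega)
    have hmod2 := Int.emod_lt_of_pos t1 (show 0 < cores.getD j 0 by omega)
    have hid := Int.mul_ediv_add_emod t1 (cores.getD j 0)
    have hcq : cores.getD j 0 * (t1 / cores.getD j 0)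
        = (t1 / cores.getD j 0) * cores.getD j 0 := mul_comm _ _
    have hqc_le : (t1 / cores.getD j 0) * cores.getD j 0 ≤ t1 := by omega
    have hgt : t1 < (t1 / cores.getD j 0 + 1) * cores.getD j 0 := by
      have hx : (t1 / cores.getD j 0 + 1) * cores.getD j 0
          = (t1 / cores.getD j 0) * cores.getD j 0 + cores.getD j 0 := by ring
      omega
    have hq0 : 0 ≤ t1 / cores.getD j 0 + 1 := by
      have hneg : (-1) / cores.getD j 0 = -1 := by
        have h : (-1 : Int) = (cores.getD j 0 - 1) + (-1) * cores.getD j 0 := by ring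
        conv_lhs => rw [h]
        rw [Int.add_mul_ediv_right _ _ (show cores.getD j 0 ≠ 0 by omega),
          Int.ediv_eq_zero_of_lt (by omega) (by omega)]
        norm_num
      have := Int.ediv_le_ediv (show 0 < cores.getD j 0 by omega) ht1
      omega
    refine ⟨mul_nonneg hq0 (by omega), dvd_mul_left _ _, ?_, ?_⟩
    · unfold rnk
      have h1 : cntI cores t1 ≤ cntI cores ((t1 / cores.getD j 0 + 1) * cores.getD j 0 - 1) := by
        unfold cntI
        have := S_mono cores hpos (show t1 ≤ (t1 / cores.getD j 0 + 1) * cores.getD j 0 - 1 by omega)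
        omega
      have h2 : 1 ≤ posD cores ((t1 / cores.getD j 0 + 1) * cores.getD j 0) j :=
        posD_pos _ _ _ (dvd_mul_left _ _)
      omega
    · intro s hs0 hds hslt
      obtain ⟨u, hu⟩ := hds
      have hu0 : 0 ≤ u := by nlinarith
      have hult : u < t1 / cores.getD j 0 + 1 := by nlinarith
      have hsle : s ≤ t1 := by nlinarith
      have h1 : posD cores s j ≤ posD cores s (cores.length - 1) := posD_mono _ _ (by omega)
      have h2 := cnt_step cores hpos hne s
      have h3 : cntI cores s ≤ cntI cores t1 := by
        unfold cntI
        have := S_mono cores hpos hsle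
        omega
      unfold rnk
      omega
  · rw [Finset.sum_congr rfl (fun j hj => by
      rw [hget j (Finset.mem_range.mp hj), Int.mul_ediv_cancel _
        (show cores.getD j 0 ≠ 0 by
          have := hpos _ (getD_mem_of_lt cores j (Finset.mem_range.mp hj))
          omega)])]
    rw [Finset.sum_add_distrib, ← S_range, Finset.sum_const, Finset.card_range, hK]
    unfold cntI
    ring

-- running the simulation r steps from any state satisfying the invariant
lemma iter_spec (cores : List Int) (hpos : ∀ c ∈ cores, 1 ≤ c) (hne : cores ≠ [])
    (k0 : Nat) (st0 : List Int × Int) (h0 : SimInv cores k0 st0.1) :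
    ∀ r : Nat,
      SimInv cores (k0 + r) (((fun st : List Int × Int => stepB cores st.1)^[r] st0)).1 ∧
      (1 ≤ r → ∃ i : Nat, i < cores.length ∧
        ((fun st : List Int × Int => stepB cores st.1)^[r] st0).2 = (i : Int) ∧
        cores.getD i 0 ∣
          (((fun st : List Int × Int => stepB cores st.1)^[r] st0).1.getD i 0 - cores.getD i 0) ∧
        rnk cores
          (((fun st : List Int × Int => stepB cores st.1)^[r] st0).1.getD i 0 - cores.getD i 0) i
          = ((k0 + r : Nat) : Int)) := by
  intro r
  induction r with
  | zero => exact ⟨by simpa using h0, by omega⟩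
  | succ r ih =>
    have hit : (fun st : List Int × Int => stepB cores st.1)^[r+1] st0
        = stepB cores (((fun st : List Int × Int => stepB cores st.1)^[r] st0)).1 := by
      rw [Function.iterate_succ_apply']
    obtain ⟨hInv, -⟩ := ih
    obtain ⟨hInv', i, him, h2, h3, h4⟩ :=
      step_inv cores (((fun st : List Int × Int => stepB cores st.1)^[r] st0)).1 (k0 + r) hpos hne hInv
    have heq : (((fun st : List Int × Int => stepB cores st.1)^[r] st0)).1.getD i 0 + cores.getD i 0
          - cores.getD i 0
        = (((fun st : List Int × Int => stepB cores st.1)^[r] st0)).1.getD i 0 := by ring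
    refine ⟨by rw [hit, show k0 + (r+1) = (k0 + r) + 1 by omega]; exact hInv',
      fun _ => ⟨i, him, by rw [hit]; exact h2, ?_, ?_⟩⟩
    · rw [hit, h3, heq]
      exact (hInv.2.1 i him).2.1
    · rw [hit, h3, heq, h4]
      push_cast
      ring

-- ---------- glue ----------

theorem solution_eq_alt (n : Int) (cores : List Int)
    (hne : cores ≠ []) (hpos : ∀ c ∈ cores, 1 ≤ c) (hn1 : 1 ≤ n)
    (hcap : n ≤ (cores.map (fun c => 500000001 / c)).sum + cores.length) :
    solution n cores = solution_alt n cores := by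
  have hm : 1 ≤ cores.length := List.length_pos_iff.mpr hne
  -- the analytic fast-forward: den, num, the seed time T1
  set denE := cores.foldl (fun d c => d * c) 1 with hdenE
  have hdprod : denE = cores.prod := by rw [hdenE, List.prod_eq_foldl]
  have hdpos : 0 < denE := by
    rw [hdprod]
    exact List.prod_pos (fun c hc => by have := hpos c hc; omega)
  have hdvdden : ∀ c ∈ cores, c ∣ denE := fun c hc => hdprod ▸ List.dvd_prod hc
  set numE := cores.foldl (fun s c => s + PySem.Int.floordiv denE c) 0 with hnumE
  have hnum : numE = (cores.map (fun c => denE / c)).sum := by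
    rw [hnumE, PySem.List.foldl_add (g := fun c => PySem.Int.floordiv denE c)]
    rw [List.map_congr_left (fun c hc => by
      rw [PySem.Int.floordiv_eq_ediv_of_pos (by have := hpos c hc; omega)] :
      ∀ c ∈ cores, PySem.Int.floordiv denE c = denE / c)]
    simp
  have hdivpos : ∀ c ∈ cores, 0 < denE / c := by
    intro c hc
    obtain ⟨e, he⟩ := hdvdden c hc
    have hc1 := hpos c hc
    have hce : denE / c = e := by rw [he]; exact Int.mul_ediv_cancel_left _ (by omega)
    rw [hce]
    nlinarith
  have hnpos : 0 < numE := by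
    rw [hnum]
    apply List.sum_pos
    · intro x hx
      obtain ⟨c, hc, rfl⟩ := List.mem_map.mp hx
      exact hdivpos c hc
    · simpa using hne
  set T1 := max (PySem.Int.floordiv ((n - 1 - (cores.length:Int)) * denE) numE) (-1) with hT1def
  have hT1ge : -1 ≤ T1 := le_max_right _ _
  have hSneg := S_neg_one cores hpos
  have hcnt0 : 0 ≤ cntI cores T1 := by
    unfold cntI
    have := S_mono cores hpos hT1ge
    omega
  -- fewer than n jobs have started by T1
  have hcntle : cntI cores T1 ≤ n - 1 := by
    rcases max_cases (PySem.Int.floordiv ((n - 1 - (cores.length:Int)) * denE) numE) (-1) with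
      ⟨hmx, hge⟩ | ⟨hmx, hlt⟩
    · rw [← hT1def] at hmx
      have hTval : T1 = ((n - 1 - (cores.length:Int)) * denE) / numE := by
        rw [hmx, PySem.Int.floordiv_eq_ediv_of_pos hnpos]
      have hTnum : T1 * numE ≤ (n - 1 - (cores.length:Int)) * denE := by
        rw [hTval]
        exact ediv_mul_le_self _ _ hnpos
      have hpercore : ∀ c ∈ cores, (T1 / c) * denE ≤ T1 * (denE / c) := by
        intro c hc
        obtain ⟨e, he⟩ := hdvdden c hc
        have hc1 := hpos c hc
        have hce : denE / c = e := by rw [he]; exact Int.mul_ediv_cancel_left _ (by omega)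
        have hepos : 0 < e := by rw [← hce]; exact hdivpos c hc
        have h1 : (T1 / c) * c ≤ T1 := ediv_mul_le_self _ _ (by omega)
        calc (T1 / c) * denE = ((T1 / c) * c) * e := by rw [he]; ring
          _ ≤ T1 * e := by
              exact mul_le_mul_of_nonneg_right h1 (by omega)
          _ = T1 * (denE / c) := by rw [hce]
      have hsums : S T1 cores * denE ≤ T1 * numE := by
        have h1 : (cores.map (fun c => (T1 / c) * denE)).sum
            ≤ (cores.map (fun c => T1 * (denE / c))).sum :=
          List.sum_le_sum (fun c hc => hpercore c hc)
        rw [List.sum_map_mul_right, List.sum_map_mul_left] at h1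
        unfold S
        rw [hnum]
        exact h1
      have hfin : S T1 cores ≤ n - 1 - (cores.length:Int) := by
        have := le_trans hsums (le_trans hTnum (le_refl _))
        exact le_of_mul_le_mul_right (by omega) hdpos
      unfold cntI
      omega
    · rw [← hT1def] at hmx
      rw [hmx]
      unfold cntI
      omega
  set k0 := (cntI cores T1).toNat with hk0
  set rn := (n - cntI cores T1).toNat with hrn
  have hrn1 : 1 ≤ rn := by omega
  -- B's program: fast-forward conversions, then the iterated step
  have hdone : cores.foldl (fun s c => s + PySem.Int.floordiv T1 c) 0 + (cores.length:Int)
      = cntI cores T1 := by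
    rw [PySem.List.foldl_add (g := fun c => PySem.Int.floordiv T1 c)]
    rw [List.map_congr_left (fun c hc => by
      rw [PySem.Int.floordiv_eq_ediv_of_pos (by have := hpos c hc; omega)] :
      ∀ c ∈ cores, PySem.Int.floordiv T1 c = T1 / c)]
    unfold cntI S
    simp
  have htimes : cores.map (fun c => (PySem.Int.floordiv T1 c + 1) * c)
      = cores.map (fun c => (T1 / c + 1) * c) :=
    List.map_congr_left (fun c hc => by
      rw [PySem.Int.floordiv_eq_ediv_of_pos (by have := hpos c hc; omega)])
  have hB : solution_alt n cores
      = ((fun st : List Int × Int => stepB cores st.1)^[rn]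
          (cores.map (fun c => (T1 / c + 1) * c), (0:Int))).2 + 1 := by
    show ((PySem.List.pyRange 0
          (n - (cores.foldl (fun s c => s + PySem.Int.floordiv T1 c) 0 + (cores.length:Int))) 1).foldl
        (fun st _ => stepB cores st.1)
        (cores.map (fun c => (PySem.Int.floordiv T1 c + 1) * c), (0:Int))).2 + 1 = _
    rw [hdone, htimes, foldl_const (fun st : List Int × Int => stepB cores st.1)]
    rw [PySem.List.length_pyRange_one,
      show n - cntI cores T1 - 0 = n - cntI cores T1 by ring]
  obtain ⟨hInvFin, hlast⟩ := iter_spec cores hpos hne k0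
    (cores.map (fun c => (T1 / c + 1) * c), (0:Int))
    (simInv_seed cores hpos hne T1 hT1ge) rn
  obtain ⟨i, him, hsnd, hdvd, hrnk⟩ := hlast hrn1
  set T := ((fun st : List Int × Int => stepB cores st.1)^[rn]
      (cores.map (fun c => (T1 / c + 1) * c), (0:Int))).1.getD i 0 - cores.getD i 0 with hTdef
  have hrnkn : cntI cores (T-1) + posD cores T i = n := by
    have h := hrnk
    unfold rnk at h
    have hcast : ((k0 + rn : Nat) : Int) = n := by
      have h1 : ((cntI cores T1).toNat : Int) = cntI cores T1 := Int.toNat_of_nonneg hcnt0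
      have h2 : (((n - cntI cores T1).toNat) : Int) = n - cntI cores T1 :=
        Int.toNat_of_nonneg (by omega)
      rw [hk0, hrn]
      push_cast [h1, h2]
      ring
    rw [hcast] at h
    exact h
  have hpd1 : 1 ≤ posD cores T i := posD_pos _ _ _ hdvd
  have hpdm : posD cores T i ≤ posD cores T (cores.length - 1) := posD_mono _ _ (by omega)
  have hstep := cnt_step cores hpos hne T
  have hcalT : cal_end_work T cores = cntI cores T := by
    rw [cal_end_work_eq _ _ hpos]; rfl
  have hcalT1 : cal_end_work (T-1) cores = cntI cores (T-1) := by
    rw [cal_end_work_eq _ _ hpos]; rfl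
  have hT1 : cal_end_work (T-1) cores < n := by rw [hcalT1]; omega
  have hT2 : n ≤ cal_end_work T cores := by rw [hcalT, hstep]; omega
  -- A's binary search lands on the same time
  have hcap' : n ≤ cal_end_work 500000001 cores := by
    rw [cal_end_work_eq _ _ hpos]; exact hcap
  have hneg1 : cal_end_work (-1) cores = 0 := by
    rw [cal_end_work_eq _ _ hpos, S_neg_one cores hpos]; ring
  set L := solutionLoop n cores 0 500000000 with hL
  obtain ⟨hA1, hA2⟩ := solutionLoop_spec n cores hpos _ 0 500000000 rfl (by omega)
    (by simpa using hneg1 ▸ (by omega : (0:Int) < n)) (by norm_num; exact hcap')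
  have hAval : solution n cores
      = PySem.List.pyGetD (arrFrom L cores 0) (-1 - (cal_end_work L cores - n)) 0 := by
    show PySem.List.pyGetD _ _ _ = _
    rw [if_neg (not_lt.mpr hA2)]
    rw [PySem.List.foldl_append_if (p := fun ic : Int × Int => PySem.Int.mod L ic.2 == 0)
      (f := fun ic : Int × Int => ic.1 + 1)]
    rfl
  have hLT : L = T := min_unique cores hpos n L T hA1 hA2 hT1 hT2
  have hlenarr : ((arrFrom T cores 0).length : Int) = posD cores T (cores.length - 1) :=
    arrFrom_length T cores hpos hne 0
  have hDT : posD cores T (cores.length - 1)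
      = cal_end_work T cores - cal_end_work (T-1) cores := by
    rw [hcalT, hcalT1, hstep]; ring
  rw [hAval, hB, hsnd, hLT]
  rw [pyGetD_neg_eq_getD _ _ (by omega) (by omega)]
  have hidx : (((arrFrom T cores 0).length : Int) + (-1 - (cal_end_work T cores - n))).toNat
      = (posD cores T i - 1).toNat := by
    omega
  rw [hidx, arrFrom_getD T cores 0 i him hdvd]
  norm_num

-- ===== VERDICT (by name: the statement is the Claim_ definition above) =====
theorem solution_spec : Claim_equal_solution := by
  intro n cores _ hpre
  show solution n cores = solution_alt n cores
  exact solution_eq_alt n cores hpre.1 hpre.2.1 hpre.2.2.1 hpre.2.2.2
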